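-- pv_equiv track=rewrite | github.com/Tswings/QDAMR4QA | QD_comp.py | isSamePath
-- ===== SOURCE A (Python) =====
-- def isSamePath(common_substring):
--     # '5a879ba55542993e715abfc3'
--     right_path = []
--     com_subs_list = common_substring.split()
--     for i in range(len(com_subs_list) - 1):
--         com_str_i = com_subs_list[i].split('-')
--         com_str_i_1 = com_subs_list[i + 1].split('-')
--         if com_str_i[-1] != com_str_i_1[0]:
--             return False
--         # if com_str_i[-1] == com_str_i_1[0]:
--         #     right_path.append(com_subs_list[i])
--
--     return True     # True if len(right_path) == (len(com_subs_list) - 1) else False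
-- ===== SOURCE B (Python) =====
-- def isSamePath(common_substring):
--     def walk(prev_last, tokens):
--         if not tokens:
--             return True
--         parts = tokens[0].split('-')
--         return (prev_last is None or parts[0] == prev_last) and walk(parts[-1], tokens[1:])
--     return walk(None, common_substring.split())
-- ===== Notes on version B (the rewrite author's own statement) =====
-- stated objective: alternative
-- what changed: Replaces A's index loop, which re-splits both neighbouring tokens in every iteration, with a recursion over the token list that splits each token exactly once and carries the previous token's last segment forward as an accumulator.
import Mathlib
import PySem

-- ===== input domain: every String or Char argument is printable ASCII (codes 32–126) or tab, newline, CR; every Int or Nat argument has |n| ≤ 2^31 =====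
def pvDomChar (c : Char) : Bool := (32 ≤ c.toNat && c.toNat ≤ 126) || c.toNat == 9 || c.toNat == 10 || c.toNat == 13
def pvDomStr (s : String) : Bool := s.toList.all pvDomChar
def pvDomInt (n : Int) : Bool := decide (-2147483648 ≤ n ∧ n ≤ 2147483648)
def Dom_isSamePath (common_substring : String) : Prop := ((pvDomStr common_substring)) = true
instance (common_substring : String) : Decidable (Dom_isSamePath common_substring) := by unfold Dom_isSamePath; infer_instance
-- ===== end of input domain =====

-- B replaces A's index loop (which re-splits both neighbouring tokens each iteration) by a
-- recursion over the token list carrying the previous token's last '-'-segment forward,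
-- splitting each token exactly once (objective: alternative decomposition; same cost).

-- ===== PORT A =====
-- the 'for i in range(len(com_subs_list) - 1)' loop with its early 'return False';
-- the '.getD ""' / '.getD []' defaults are unreachable: every index produced by the range is in
-- bounds and str.split('-') never returns an empty list.
def isSamePathGo (com_subs_list : List String) : List Int → Bool
  | [] => true
  | i :: rest =>
    let com_str_i := (PySem.Str.split? ((PySem.List.pyGet? com_subs_list i).getD "") "-").getD []
    let com_str_i_1 := (PySem.Str.split? ((PySem.List.pyGet? com_subs_list (i + 1)).getD "") "-").getD []
    if (PySem.List.pyGet? com_str_i (-1)).getD "" != (PySem.List.pyGet? com_str_i_1 0).getD "" then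
      false
    else
      isSamePathGo com_subs_list rest

def isSamePath (common_substring : String) : Bool :=
  let com_subs_list := PySem.Str.split₀ common_substring
  isSamePathGo com_subs_list (PySem.List.pyRange 0 ((com_subs_list.length : Int) - 1) 1)

-- ===== PORT B =====
-- the inner recursive 'walk(prev_last, tokens)' of Source B: prev_last is None ↦ Option.none;
-- parts[0] / parts[-1] as in Source B (the .getD defaults are unreachable: split('-') never
-- returns an empty list); tokens[0] / tokens[1:] are the head and tail of the cons.
def isSamePathWalk (prev_last : Option String) : List String → Bool
  | [] => true
  | t :: rest =>
    let parts := (PySem.Str.split? t "-").getD []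
    (match prev_last with
     | none => true
     | some p => (PySem.List.pyGet? parts 0).getD "" == p) &&
    isSamePathWalk (some ((PySem.List.pyGet? parts (-1)).getD "")) rest

def isSamePath_alt (common_substring : String) : Bool :=
  isSamePathWalk none (PySem.Str.split₀ common_substring)

-- ===== PRECONDITION & SPEC =====
def Spec_isSamePath (common_substring : String) (out : Bool) : Prop := out = isSamePath_alt common_substring
instance (common_substring : String) (out : Bool) : Decidable (Spec_isSamePath common_substring out) := by unfold Spec_isSamePath; infer_instance

-- ===== CLAIM (what is proved, stated in full; the proofs are below) =====
def Claim_equal_isSamePath : Prop := ∀ (common_substring : String), Dom_isSamePath common_substring → Spec_isSamePath common_substring (isSamePath common_substring)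

-- ===== LEMMAS AND PROOFS =====

-- last '-'-segment of a token, first '-'-segment of a token (as both ports compute them)
def eTok (t : String) : String := (PySem.List.pyGet? ((PySem.Str.split? t "-").getD []) (-1)).getD ""
def sTok (t : String) : String := (PySem.List.pyGet? ((PySem.Str.split? t "-").getD []) 0).getD ""

-- head-check: the first token of lst (if any) starts with segment p
def hchk : List String → String → Bool
  | [], _ => true
  | a :: _, p => sTok a == p

-- the common abstraction: adjacent tokens agree pairwise
def pairChk : List String → Bool
  | a :: b :: r => (eTok a == sTok b) && pairChk (b :: r)
  | _ => true

lemma pairChk_short (l : List String) (h : l.length ≤ 1) : pairChk l = true := by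
  match l with
  | [] => rfl
  | [a] => rfl
  | a :: b :: r => simp at h

lemma go_eq (lst : List String) : ∀ m k : Nat, lst.length ≤ k + m →
    isSamePathGo lst (PySem.List.pyRange (k : Int) ((lst.length : Int) - 1) 1) = pairChk (lst.drop k) := by
  intro m
  induction m with
  | zero =>
    intro k hk
    rw [PySem.List.pyRange_one_eq_nil (by omega)]
    rw [List.drop_eq_nil_of_le (by omega)]
    rfl
  | succ m ih =>
    intro k hk
    by_cases h : k + 1 < lst.length
    · rw [PySem.List.pyRange_one_cons (by omega)]
      have h0 : k < lst.length := by omega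
      have hd : lst.drop k = lst[k] :: lst[k+1] :: lst.drop (k+2) := by
        rw [List.drop_eq_getElem_cons h0, List.drop_eq_getElem_cons h]
      have hcast : (k : Int) + 1 = ((k + 1 : Nat) : Int) := by push_cast; ring
      simp only [isSamePathGo, hcast, PySem.List.pyGet?_natCast,
        List.getElem?_eq_getElem h0, List.getElem?_eq_getElem h, Option.getD_some]
      rw [ih (k+1) (by omega)]
      rw [hd, pairChk]
      have hd1 : lst.drop (k+1) = lst[k+1] :: lst.drop (k+2) := by
        rw [List.drop_eq_getElem_cons h]
      rw [hd1]
      cases hbe : (eTok lst[k] == sTok lst[k+1]) <;>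
        simp [eTok, sTok, bne] at hbe ⊢ <;> simp [hbe]
    · rw [PySem.List.pyRange_one_eq_nil (by omega)]
      have : (lst.drop k).length ≤ 1 := by simp; omega
      rw [pairChk_short _ this]
      rfl

lemma pairChk_cons (a : String) (r : List String) :
    pairChk (a :: r) = (hchk r (eTok a) && pairChk r) := by
  cases r with
  | nil => rfl
  | cons b r' =>
    show (eTok a == sTok b && pairChk (b :: r')) = (sTok b == eTok a && pairChk (b :: r'))
    rw [BEq.comm]

lemma walk_some (lst : List String) : ∀ p : String,
    isSamePathWalk (some p) lst = (hchk lst p && pairChk lst) := by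
  induction lst with
  | nil => intro p; rfl
  | cons a r ih =>
    intro p
    show ((sTok a == p) && isSamePathWalk (some (eTok a)) r) = _
    rw [ih, pairChk_cons]
    rfl

lemma walk_none (lst : List String) : isSamePathWalk none lst = pairChk lst := by
  cases lst with
  | nil => rfl
  | cons a r =>
    show (true && isSamePathWalk (some (eTok a)) r) = pairChk (a :: r)
    rw [walk_some, pairChk_cons, Bool.true_and]

-- ===== VERDICT (by name: the statement is the Claim_ definition above) =====
theorem isSamePath_spec : Claim_equal_isSamePath := by
  intro s _
  show isSamePath s = isSamePath_alt s
  have hA : isSamePath s = pairChk (PySem.Str.split₀ s) := by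
    simpa [isSamePath] using
      go_eq (PySem.Str.split₀ s) (PySem.Str.split₀ s).length 0 (by omega)
  rw [hA, isSamePath_alt, walk_none]
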